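-- pv_equiv track=rewrite | github.com/cliff-rosen/table-that | backend/tools/builtin/strategies/coerce.py | _coerce_select
-- ===== SOURCE A (Python) =====
-- from typing import Optional, Tuple
--
-- def _coerce_select(value: str, options: list) -> Tuple[str, str]:
--     """Coerce a value to match one of the select column options."""
--     lower = value.strip().lower()
--     # Exact match (case-insensitive)
--     for opt in options:
--         if opt.lower() == lower:
--             return (opt, "high")
--     # Partial/fuzzy match: check if any option is contained in the value or vice versa
--     for opt in options:
--         if opt.lower() in lower or lower in opt.lower():
--             return (opt, "medium")
--     return (value, "low")
-- ===== SOURCE B (Python) =====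
-- def _coerce_select(value: str, options: list):
--     """Single pass: return first exact match immediately, remember first fuzzy candidate."""
--     lower = value.strip().lower()
--     fuzzy = None
--     for opt in options:
--         ol = opt.lower()
--         if ol == lower:
--             return (opt, "high")
--         if fuzzy is None and (ol in lower or lower in ol):
--             fuzzy = opt
--     if fuzzy is not None:
--         return (fuzzy, "medium")
--     return (value, "low")
-- ===== Notes on version B (the rewrite author's own statement) =====
-- stated objective: alternative
-- what changed: Replaced A's two separate scans over options with one pass that returns an exact match immediately and carries the first fuzzy candidate in an accumulator.
import Mathlib
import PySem

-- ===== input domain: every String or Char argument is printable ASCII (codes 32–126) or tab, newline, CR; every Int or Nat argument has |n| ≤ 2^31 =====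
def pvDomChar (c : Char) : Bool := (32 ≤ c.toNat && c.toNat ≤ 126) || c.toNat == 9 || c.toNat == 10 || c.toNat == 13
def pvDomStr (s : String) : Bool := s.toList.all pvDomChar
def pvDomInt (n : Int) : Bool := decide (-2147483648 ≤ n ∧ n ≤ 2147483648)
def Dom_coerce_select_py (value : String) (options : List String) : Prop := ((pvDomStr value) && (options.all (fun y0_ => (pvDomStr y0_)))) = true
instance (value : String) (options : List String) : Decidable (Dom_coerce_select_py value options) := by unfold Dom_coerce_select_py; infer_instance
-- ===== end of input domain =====

-- B is an alternative decomposition of the same task: one pass with a fuzzy-candidate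
-- accumulator instead of A's two full scans; same cost, proved to return the same value.

-- ===== PORT A =====
-- second loop of A: first fuzzy match over the whole options list, else (value, "low")
def pvALoop2 (value lowr : String) : List String → String × String
  | [] => (value, "low")
  | opt :: rest =>
    if PySem.Str.isIn (PySem.Str.lower opt) lowr || PySem.Str.isIn lowr (PySem.Str.lower opt) then
      (opt, "medium")
    else pvALoop2 value lowr rest

-- first loop of A: first exact match, else fall through to the second loop over `all`
def pvALoop1 (value lowr : String) (all : List String) : List String → String × String
  | [] => pvALoop2 value lowr all
  | opt :: rest =>
    if PySem.Str.lower opt = lowr then (opt, "high")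
    else pvALoop1 value lowr all rest

def coerce_select_py (value : String) (options : List String) : String × String :=
  let lowr := PySem.Str.lower (PySem.Str.strip value)
  pvALoop1 value lowr options options

-- ===== PORT B =====
-- single pass: return exact match immediately, remember the first fuzzy candidate
def pvBLoop (value lowr : String) (fuzzy : Option String) : List String → String × String
  | [] => match fuzzy with
          | some f => (f, "medium")
          | none => (value, "low")
  | opt :: rest =>
    let ol := PySem.Str.lower opt
    if ol = lowr then (opt, "high")
    else if fuzzy = none ∧ (PySem.Str.isIn ol lowr || PySem.Str.isIn lowr ol) = true then
      pvBLoop value lowr (some opt) rest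
    else
      pvBLoop value lowr fuzzy rest

def coerce_select_py_alt (value : String) (options : List String) : String × String :=
  let lowr := PySem.Str.lower (PySem.Str.strip value)
  pvBLoop value lowr none options

-- ===== PRECONDITION & SPEC =====
def Spec_coerce_select_py (value : String) (options : List String) (out : String × String) : Prop := out = coerce_select_py_alt value options
instance (value : String) (options : List String) (out : String × String) : Decidable (Spec_coerce_select_py value options out) := by unfold Spec_coerce_select_py; infer_instance

-- ===== CLAIM (what is proved, stated in full; the proofs are below) =====
def Claim_equal_coerce_select_py : Prop := ∀ (value : String) (options : List String), Dom_coerce_select_py value options → Spec_coerce_select_py value options (coerce_select_py value options)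

-- ===== LEMMAS AND PROOFS =====

-- the fuzzy predicate, as the Bool test both programs perform
def pvFuzzyB (lowr o : String) : Bool :=
  PySem.Str.isIn (PySem.Str.lower o) lowr || PySem.Str.isIn lowr (PySem.Str.lower o)

-- A's second loop returns the first fuzzy match of the list, else (value, "low")
lemma pvALoop2_eq_find (value lowr : String) (l : List String) :
    pvALoop2 value lowr l =
      match l.find? (pvFuzzyB lowr) with
      | some f => (f, "medium")
      | none => (value, "low") := by
  induction l with
  | nil => rfl
  | cons opt rest ih =>
    by_cases h : pvFuzzyB lowr opt = true
    · simp [pvALoop2, pvFuzzyB] at h ⊢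
      simp [pvFuzzyB, h]
    · simp [pvFuzzyB] at h
      simp [pvALoop2, pvFuzzyB, h, ih]

-- invariant: scanning `rest` after a prefix `pre` with no exact match, A's remaining
-- computation equals B's loop carrying the first fuzzy match of `pre`
lemma pvKey (value lowr : String) (rest : List String) :
    ∀ pre : List String, (∀ o ∈ pre, PySem.Str.lower o ≠ lowr) →
      pvALoop1 value lowr (pre ++ rest) rest = pvBLoop value lowr (pre.find? (pvFuzzyB lowr)) rest := by
  induction rest with
  | nil =>
    intro pre _
    show pvALoop2 value lowr (pre ++ []) = _
    rw [List.append_nil, pvALoop2_eq_find]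
    cases pre.find? (pvFuzzyB lowr) <;> rfl
  | cons opt rest ih =>
    intro pre hpre
    have hcons : ∀ fz, pvBLoop value lowr fz (opt :: rest) =
        if PySem.Str.lower opt = lowr then (opt, "high")
        else if fz = none ∧ (PySem.Str.isIn (PySem.Str.lower opt) lowr || PySem.Str.isIn lowr (PySem.Str.lower opt)) = true then
          pvBLoop value lowr (some opt) rest
        else pvBLoop value lowr fz rest := fun fz => rfl
    show (if PySem.Str.lower opt = lowr then (opt, "high")
          else pvALoop1 value lowr (pre ++ opt :: rest) rest) = pvBLoop value lowr _ (opt :: rest)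
    rw [hcons]
    by_cases hex : PySem.Str.lower opt = lowr
    · rw [if_pos hex, if_pos hex]
    · have hpre' : ∀ o ∈ pre ++ [opt], PySem.Str.lower o ≠ lowr := by
        intro o ho
        rcases List.mem_append.1 ho with h | h
        · exact hpre o h
        · simp at h; subst h; exact hex
      have hmain := ih (pre ++ [opt]) hpre'
      rw [List.append_assoc] at hmain
      simp only [List.singleton_append] at hmain
      rw [if_neg hex, if_neg hex, hmain, List.find?_append]
      cases hf : pre.find? (pvFuzzyB lowr) with
      | some f =>
        rw [if_neg (by simp)]
        rfl
      | none =>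
        by_cases hfz : (PySem.Str.isIn (PySem.Str.lower opt) lowr || PySem.Str.isIn lowr (PySem.Str.lower opt)) = true
        · rw [if_pos ⟨rfl, hfz⟩]
          simp only [Option.none_or, List.find?_cons, pvFuzzyB, hfz]
        · rw [if_neg (fun h => hfz h.2)]
          simp only [Option.none_or, List.find?_cons]
          rw [show pvFuzzyB lowr opt = false by simpa [pvFuzzyB] using hfz]
          rfl

-- ===== VERDICT (by name: the statement is the Claim_ definition above) =====
theorem coerce_select_py_spec : Claim_equal_coerce_select_py := by
  intro value options _
  show coerce_select_py value options = coerce_select_py_alt value options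
  unfold coerce_select_py coerce_select_py_alt
  have := pvKey value (PySem.Str.lower (PySem.Str.strip value)) options [] (by simp)
  simpa using this
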